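-- pv_equiv track=rewrite | github.com/Alexamk/minipath | split_fused_nodes.py | remove_connections_nodes_split
-- ===== SOURCE A (Python) =====
-- def remove_connections_nodes_split(nodes_split_label1, nodes_split_label2, edges_to_filter):
--     t = 0
--     for node1 in nodes_split_label1:
--         for node2 in nodes_split_label2:
--             if edges_to_filter.get(node1, {}).get(node2) is not None:
--                 t += 1
--                 edges_to_filter[node1].pop(node2)
--     return t
-- ===== SOURCE B (Python) =====
-- def remove_connections_nodes_split(nodes_split_label1, nodes_split_label2, edges_to_filter):
--     # Pure counting pass: dedup label1 (repeated node1 would find its edges already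
--     # gone in A), then count inner keys lying in the label2 set. Unlike A this does
--     # NOT mutate edges_to_filter; equivalence is about the return value.
--     targets = set(nodes_split_label2)
--     t = 0
--     for n1 in dict.fromkeys(nodes_split_label1):
--         inner = edges_to_filter.get(n1)
--         if inner is not None:
--             t += sum(1 for k in inner if k in targets)
--     return t
-- ===== Notes on version B (the rewrite author's own statement) =====
-- stated objective: faster
-- what changed: A's nested scan testing every (label1,label2) pair with in-place deletion is replaced by a pure single counting pass: dedup label1 and for each node count the inner dict's keys lying in a prebuilt label2 set, with no mutation and no per-pair probing (return-value equivalence; B does not delete the edges).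
import Mathlib
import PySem

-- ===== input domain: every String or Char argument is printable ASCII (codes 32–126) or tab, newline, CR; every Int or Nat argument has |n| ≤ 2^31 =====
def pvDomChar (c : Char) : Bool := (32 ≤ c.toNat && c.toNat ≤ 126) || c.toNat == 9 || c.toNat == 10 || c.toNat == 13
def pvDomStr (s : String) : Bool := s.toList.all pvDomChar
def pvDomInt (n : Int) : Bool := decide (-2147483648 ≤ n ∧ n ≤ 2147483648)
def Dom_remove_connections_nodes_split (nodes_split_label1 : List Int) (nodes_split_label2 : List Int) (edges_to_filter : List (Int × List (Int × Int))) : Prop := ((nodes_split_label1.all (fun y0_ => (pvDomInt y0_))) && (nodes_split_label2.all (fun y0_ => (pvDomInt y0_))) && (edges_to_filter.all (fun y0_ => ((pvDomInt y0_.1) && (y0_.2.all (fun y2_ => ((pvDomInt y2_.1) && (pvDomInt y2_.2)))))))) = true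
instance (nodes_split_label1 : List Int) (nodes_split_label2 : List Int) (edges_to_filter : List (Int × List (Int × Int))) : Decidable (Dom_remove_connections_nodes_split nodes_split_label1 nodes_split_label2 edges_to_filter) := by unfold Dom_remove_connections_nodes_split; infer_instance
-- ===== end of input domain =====

-- B replaces A's mutating nested (label1 × label2) scan by a pure single counting pass:
-- dedup label1 and count each node's inner-dict keys lying in the label2 set (objective:
-- faster). A deletes the matched edges in place and B does not mutate its argument:
-- the theorems below are about the return value only.
-- Both ports decode the assoc-list argument into a PySem.Dict exactly as Python's dict()
-- does (later duplicate keys overwrite earlier ones).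

-- decoding of the dict[int, dict[int, int]] argument (shared input decoding, not algorithm)
def pvDecode (edges_to_filter : List (Int × List (Int × Int))) : PySem.Dict Int (PySem.Dict Int Int) :=
  PySem.Dict.ofList (edges_to_filter.map (fun p => (p.1, PySem.Dict.ofList p.2)))

-- ===== PORT A =====
def remove_connections_nodes_split (nodes_split_label1 : List Int) (nodes_split_label2 : List Int) (edges_to_filter : List (Int × List (Int × Int))) : Int :=
  (nodes_split_label1.foldl (fun st node1 =>
      nodes_split_label2.foldl (fun st node2 =>
          match st.2.get? node1 with
          | none => st                      -- .get(node1, {}).get(node2) is None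
          | some inner =>
            match inner.get? node2 with
            | none => st                    -- .get(node2) is None
            | some _ =>                     -- t += 1; edges_to_filter[node1].pop(node2)
              (st.1 + 1, st.2.insert node1 (inner.erase node2))) st)
    ((0 : Int), pvDecode edges_to_filter)).1

-- ===== PORT B =====
def remove_connections_nodes_split_alt (nodes_split_label1 : List Int) (nodes_split_label2 : List Int) (edges_to_filter : List (Int × List (Int × Int))) : Int :=
  let d := pvDecode edges_to_filter
  let targets : PySem.Set Int := PySem.Set.ofList nodes_split_label2   -- targets = set(label2)
  (PySem.List.dedup nodes_split_label1).foldl (fun t n1 =>            -- for n1 in dict.fromkeys(label1)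
      match d.get? n1 with
      | none => t                                                     -- inner is None
      | some inner =>                                                 -- t += sum(1 for k in inner if k in targets)
        t + ((inner.keys.filter (fun k => targets.contains k)).length : Int))
    (0 : Int)

-- ===== PRECONDITION & SPEC =====
def Spec_remove_connections_nodes_split (nodes_split_label1 : List Int) (nodes_split_label2 : List Int) (edges_to_filter : List (Int × List (Int × Int))) (out : Int) : Prop := out = remove_connections_nodes_split_alt nodes_split_label1 nodes_split_label2 edges_to_filter
instance (nodes_split_label1 : List Int) (nodes_split_label2 : List Int) (edges_to_filter : List (Int × List (Int × Int))) (out : Int) : Decidable (Spec_remove_connections_nodes_split nodes_split_label1 nodes_split_label2 edges_to_filter out) := by unfold Spec_remove_connections_nodes_split; infer_instance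

-- ===== CLAIM (what is proved, stated in full; the proofs are below) =====
def Claim_equal_remove_connections_nodes_split : Prop := ∀ (nodes_split_label1 : List Int) (nodes_split_label2 : List Int) (edges_to_filter : List (Int × List (Int × Int))), Dom_remove_connections_nodes_split nodes_split_label1 nodes_split_label2 edges_to_filter → Spec_remove_connections_nodes_split nodes_split_label1 nodes_split_label2 edges_to_filter (remove_connections_nodes_split nodes_split_label1 nodes_split_label2 edges_to_filter)

-- ===== LEMMAS AND PROOFS =====

-- the inner dict currently stored at key n (empty when absent), and the number of
-- distinct label2-nodes among its keys — the quantity both programs add per label1-node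
def pvDOf (e : PySem.Dict Int (PySem.Dict Int Int)) (n : Int) : PySem.Dict Int Int :=
  (e.get? n).getD PySem.Dict.empty

def pvCnt (l2 : List Int) (d : PySem.Dict Int Int) : Int :=
  ((PySem.Set.inter (PySem.Set.ofList l2) d.keys).length : Int)

def pvSum (l2 : List Int) (e : PySem.Dict Int (PySem.Dict Int Int)) (s : List Int) : Int :=
  (s.map (fun n => pvCnt l2 (pvDOf e n))).sum

theorem pv_keys_contains (d : PySem.Dict Int Int) (x : Int) :
    d.keys.contains x = d.contains x := by
  rw [PySem.Dict.contains_eq_decide_mem_keys]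
  simp

theorem pvCnt_eq_filter (l2 : List Int) (d : PySem.Dict Int Int) :
    pvCnt l2 d = (((PySem.Set.ofList l2).filter (fun x => d.contains x)).length : Int) := by
  simp only [pvCnt, PySem.Set.inter, PySem.Set.contains, pv_keys_contains]

theorem pvCnt_empty (l2 : List Int) : pvCnt l2 PySem.Dict.empty = 0 := by
  simp [pvCnt_eq_filter, PySem.Dict.contains_empty]

theorem pvCnt_nil (d : PySem.Dict Int Int) : pvCnt [] d = 0 := by
  simp [pvCnt, PySem.Set.ofList, PySem.Set.empty, PySem.Set.inter]

theorem pvCnt_eq_zero (l2 : List Int) (d : PySem.Dict Int Int)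
    (h : ∀ x ∈ l2, d.contains x = false) : pvCnt l2 d = 0 := by
  rw [pvCnt_eq_filter]
  have : (PySem.Set.ofList l2).filter (fun x => d.contains x) = [] := by
    apply List.filter_eq_nil_iff.mpr
    intro x hx
    simp [h x ((PySem.Set.mem_ofList l2 x).mp hx)]
  simp [this]

theorem pv_get?_erase (d : PySem.Dict Int Int) (k k' : Int) :
    (d.erase k).get? k' = if k' = k then none else d.get? k' := by
  simp only [PySem.Dict.erase, PySem.Dict.get?]
  induction d.items with
  | nil => by_cases h : k' = k <;> simp [h]
  | cons p t ih =>
      by_cases h1 : p.1 = k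
      · rw [List.filter_cons_of_neg (by simp [h1]), ih]
        by_cases h2 : k' = k
        · simp [h2]
        · rw [if_neg h2, if_neg h2, List.find?_cons_of_neg (by simp; omega)]
      · rw [List.filter_cons_of_pos (by simp [h1])]
        by_cases h2 : p.1 = k'
        · rw [List.find?_cons_of_pos (by simp [h2]), List.find?_cons_of_pos (by simp [h2]),
            if_neg (by omega)]
        · rw [List.find?_cons_of_neg (by simp [h2]), List.find?_cons_of_neg (by simp [h2]), ih]

theorem pv_contains_erase (d : PySem.Dict Int Int) (k k' : Int) :
    (d.erase k).contains k' = (d.contains k' && !(k' == k)) := by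
  rw [PySem.Dict.contains_eq_isSome_get?, PySem.Dict.contains_eq_isSome_get?, pv_get?_erase]
  by_cases h : k' = k <;> simp [h]

-- counting step lemmas for pvCnt
theorem pvCnt_cons_hit (k : Int) (ks : List Int) (d : PySem.Dict Int Int)
    (h : d.contains k = true) : pvCnt (k :: ks) d = 1 + pvCnt ks (d.erase k) := by
  rw [pvCnt_eq_filter, pvCnt_eq_filter, PySem.Set.ofList_cons]
  rw [List.filter_cons_of_pos h]
  simp only [PySem.Set.discard, List.filter_filter, List.length_cons, pv_contains_erase]
  push_cast; ring

theorem pvCnt_cons_miss (k : Int) (ks : List Int) (d : PySem.Dict Int Int)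
    (h : d.contains k = false) : pvCnt (k :: ks) d = pvCnt ks d := by
  rw [pvCnt_eq_filter, pvCnt_eq_filter, PySem.Set.ofList_cons]
  rw [List.filter_cons_of_neg (by simp [h])]
  simp only [PySem.Set.discard, List.filter_filter]
  have heq : List.filter (fun a => d.contains a && !a == k) (PySem.Set.ofList ks)
      = List.filter (fun x => d.contains x) (PySem.Set.ofList ks) :=
    List.filter_congr (fun x _ => by by_cases hx : x = k <;> simp [hx, h])
  rw [heq]

-- the inner loop of A at a fixed node1: it adds pvCnt, touches only the entry at node1,
-- and leaves that entry with no key of label2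
theorem pv_innerA (node1 : Int) (l2 : List Int) : ∀ (t : Int) (e : PySem.Dict Int (PySem.Dict Int Int)),
    (l2.foldl (fun st node2 =>
        match st.2.get? node1 with
        | none => st
        | some inner =>
          match inner.get? node2 with
          | none => st
          | some _ => (st.1 + 1, st.2.insert node1 (inner.erase node2))) (t, e)).1
      = t + pvCnt l2 (pvDOf e node1)
    ∧ (∀ m, m ≠ node1 →
        (l2.foldl (fun st node2 =>
          match st.2.get? node1 with
          | none => st
          | some inner =>
            match inner.get? node2 with
            | none => st
            | some _ => (st.1 + 1, st.2.insert node1 (inner.erase node2))) (t, e)).2.get? m = e.get? m)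
    ∧ (∀ x, (pvDOf (l2.foldl (fun st node2 =>
          match st.2.get? node1 with
          | none => st
          | some inner =>
            match inner.get? node2 with
            | none => st
            | some _ => (st.1 + 1, st.2.insert node1 (inner.erase node2))) (t, e)).2 node1).contains x
        = ((pvDOf e node1).contains x && !(decide (x ∈ l2)))) := by
  induction l2 with
  | nil => intro t e; refine ⟨by simp [pvCnt_nil], fun m _ => by simp, fun x => by simp⟩
  | cons k ks ih =>
      intro t e
      simp only [List.foldl_cons]
      cases h1 : e.get? node1 with
      | none =>
          obtain ⟨ih1, ih2, ih3⟩ := ih t e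
          refine ⟨?_, ih2, ?_⟩
          · rw [ih1]
            have hd : pvDOf e node1 = PySem.Dict.empty := by simp [pvDOf, h1]
            rw [hd, pvCnt_cons_miss _ _ _ (by simp)]
          · intro x
            rw [ih3 x]
            simp [pvDOf, h1]
      | some inner =>
          cases h2 : inner.get? k with
          | none =>
              simp only [h2]
              obtain ⟨ih1, ih2, ih3⟩ := ih t e
              have hd : pvDOf e node1 = inner := by simp [pvDOf, h1]
              have hc : inner.contains k = false := by
                rw [PySem.Dict.contains_eq_isSome_get?, h2]; rfl
              refine ⟨?_, ih2, ?_⟩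
              · rw [ih1, hd, pvCnt_cons_miss _ _ _ hc]
              · intro x
                rw [ih3 x, hd]
                by_cases hx : x = k <;> simp [hx, hc]
          | some v =>
              simp only [h2]
              obtain ⟨ih1, ih2, ih3⟩ := ih (t + 1) (e.insert node1 (inner.erase k))
              have hd : pvDOf e node1 = inner := by simp [pvDOf, h1]
              have hd' : pvDOf (e.insert node1 (inner.erase k)) node1 = inner.erase k := by
                simp [pvDOf, PySem.Dict.get?_insert_self]
              have hc : inner.contains k = true := by
                rw [PySem.Dict.contains_eq_isSome_get?, h2]; rfl
              refine ⟨?_, ?_, ?_⟩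
              · rw [ih1, hd', hd, pvCnt_cons_hit _ _ _ hc]; ring
              · intro m hm
                rw [ih2 m hm, PySem.Dict.get?_insert_of_ne _ _ hm]
              · intro x
                rw [ih3 x, hd', hd, pv_contains_erase]
                by_cases hx : x = k <;> by_cases hxs : x ∈ ks <;>
                  simp [hx, hxs]

theorem pvSum_shift (l2 : List Int) (e e' : PySem.Dict Int (PySem.Dict Int Int)) (n1 : Int) (s : List Int)
    (h0 : pvCnt l2 (pvDOf e' n1) = 0)
    (h : ∀ n, n ≠ n1 → e'.get? n = e.get? n) :
    pvSum l2 e' s = pvSum l2 e (s.filter (fun y => !(y == n1))) := by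
  induction s with
  | nil => rfl
  | cons y ys ih =>
      simp only [pvSum, List.map_cons, List.sum_cons, List.filter_cons] at *
      by_cases hy : y = n1
      · subst hy
        simp only [beq_self_eq_true, Bool.not_true]
        rw [h0, ih]
        simp
      · have hd : pvDOf e' y = pvDOf e y := by unfold pvDOf; rw [h y hy]
        simp only [show (!(y == n1)) = true by simp [hy], if_true, List.map_cons,
          List.sum_cons]
        rw [ih, hd]

theorem pv_outerA (l2 : List Int) : ∀ (l1 : List Int) (t : Int) (e : PySem.Dict Int (PySem.Dict Int Int)),
    (l1.foldl (fun st node1 =>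
        l2.foldl (fun st node2 =>
          match st.2.get? node1 with
          | none => st
          | some inner =>
            match inner.get? node2 with
            | none => st
            | some _ => (st.1 + 1, st.2.insert node1 (inner.erase node2))) st) (t, e)).1
      = t + pvSum l2 e (PySem.Set.ofList l1) := by
  intro l1
  induction l1 with
  | nil => intro t e; simp [PySem.Set.ofList, PySem.Set.empty, pvSum]
  | cons n1 rest ih =>
      intro t e
      simp only [List.foldl_cons]
      obtain ⟨h1, h2, h3⟩ := pv_innerA n1 l2 t e
      have h0 : pvCnt l2 (pvDOf (l2.foldl (fun st node2 =>
          match st.2.get? n1 with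
          | none => st
          | some inner =>
            match inner.get? node2 with
            | none => st
            | some _ => (st.1 + 1, st.2.insert n1 (inner.erase node2))) (t, e)).2 n1) = 0 := by
        apply pvCnt_eq_zero
        intro x hx
        rw [h3 x]
        simp [hx]
      have hstep : l2.foldl (fun st node2 =>
          match st.2.get? n1 with
          | none => st
          | some inner =>
            match inner.get? node2 with
            | none => st
            | some _ => (st.1 + 1, st.2.insert n1 (inner.erase node2))) (t, e)
          = ((l2.foldl (fun st node2 =>
          match st.2.get? n1 with
          | none => st
          | some inner =>
            match inner.get? node2 with
            | none => st
            | some _ => (st.1 + 1, st.2.insert n1 (inner.erase node2))) (t, e)).1, (l2.foldl (fun st node2 =>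
          match st.2.get? n1 with
          | none => st
          | some inner =>
            match inner.get? node2 with
            | none => st
            | some _ => (st.1 + 1, st.2.insert n1 (inner.erase node2))) (t, e)).2) := rfl
      rw [hstep, ih]
      rw [h1, pvSum_shift l2 e _ n1 _ h0 h2]
      rw [PySem.Set.ofList_cons]
      simp only [pvSum, PySem.Set.discard, List.map_cons, List.sum_cons]
      ring

-- counting the common elements of two duplicate-free lists is symmetric
theorem pv_count_comm (a b : List Int) (ha : a.Nodup) (hb : b.Nodup) :
    (a.filter (fun x => decide (x ∈ b))).length = (b.filter (fun x => decide (x ∈ a))).length := by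
  rw [← List.toFinset_card_of_nodup (ha.filter _), ← List.toFinset_card_of_nodup (hb.filter _)]
  rw [List.toFinset_filter, List.toFinset_filter]
  congr 1
  ext x
  simp [and_comm]

-- B's per-node count (filter over the inner keys) equals A's pvCnt (filter over label2)
theorem pvCnt_eq_keysFilter (l2 : List Int) (d : PySem.Dict Int Int) (hk : d.keys.Nodup) :
    pvCnt l2 d
      = ((d.keys.filter (fun k => (PySem.Set.ofList l2).contains k)).length : Int) := by
  rw [pvCnt_eq_filter]
  congr 1
  have h1 : (PySem.Set.ofList l2).filter (fun x => d.contains x)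
      = (PySem.Set.ofList l2).filter (fun x => decide (x ∈ d.keys)) := by
    apply List.filter_congr
    intro x _
    rw [PySem.Dict.contains_eq_decide_mem_keys]
  have h2 : d.keys.filter (fun k => (PySem.Set.ofList l2).contains k)
      = d.keys.filter (fun k => decide (k ∈ PySem.Set.ofList l2)) := by
    apply List.filter_congr
    intro k _
    simp [PySem.Set.contains]
  rw [h1, h2, pv_count_comm _ _ (PySem.Set.nodup_ofList l2) hk]

theorem pv_values_foldl {KT VT : Type} [BEq KT] [LawfulBEq KT] :
    ∀ (ps : List (KT × VT)) (d : PySem.Dict KT VT) (v : VT),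
      v ∈ (ps.foldl (fun acc p => acc.insert p.1 p.2) d).values →
        v ∈ d.values ∨ ∃ p ∈ ps, v = p.2 := by
  intro ps
  induction ps with
  | nil => intro d v hv; exact Or.inl hv
  | cons q qs ih =>
      intro d v hv
      rcases ih (d.insert q.1 q.2) v hv with h | ⟨p, hp, hvp⟩
      · rcases PySem.Dict.mem_values_insert d q.1 q.2 v h with h' | h'
        · exact Or.inr ⟨q, List.mem_cons_self .., h'⟩
        · exact Or.inl h'
      · exact Or.inr ⟨p, List.mem_cons_of_mem _ hp, hvp⟩

theorem pv_decode_keys_nodup (ef : List (Int × List (Int × Int))) (n : Int)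
    (inner : PySem.Dict Int Int) (h : (pvDecode ef).get? n = some inner) :
    inner.keys.Nodup := by
  have hmem : (n, inner) ∈ (pvDecode ef).items :=
    PySem.Dict.mem_items_of_get?_eq_some _ h
  have hval : inner ∈ (pvDecode ef).values := by
    simp only [PySem.Dict.values]
    exact List.mem_map.mpr ⟨(n, inner), hmem, rfl⟩
  unfold pvDecode PySem.Dict.ofList PySem.Dict.update at hval
  have := pv_values_foldl (ef.map (fun p => (p.1, PySem.Dict.ofList p.2)))
    PySem.Dict.empty inner hval
  rcases this with h' | ⟨p, hp, hvp⟩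
  · simp [PySem.Dict.values, PySem.Dict.empty] at h'
  · rcases List.mem_map.mp hp with ⟨q, _, rfl⟩
    rw [hvp]
    exact PySem.Dict.nodup_keys_ofList q.2

-- B's fold over any list of nodes accumulates pvSum
theorem pv_outerB (l2 : List Int) (e : PySem.Dict Int (PySem.Dict Int Int))
    (hval : ∀ n inner, e.get? n = some inner → inner.keys.Nodup) :
    ∀ (s : List Int) (t : Int),
    (s.foldl (fun t n1 =>
        match e.get? n1 with
        | none => t
        | some inner =>
          t + ((inner.keys.filter (fun k => (PySem.Set.ofList l2).contains k)).length : Int)) t)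
      = t + pvSum l2 e s := by
  intro s
  induction s with
  | nil => intro t; simp [pvSum]
  | cons y ys ih =>
      intro t
      simp only [List.foldl_cons]
      cases h1 : e.get? y with
      | none =>
          rw [ih]
          have hd : pvDOf e y = PySem.Dict.empty := by simp [pvDOf, h1]
          simp [pvSum, hd, pvCnt_empty]
      | some inner =>
          rw [ih]
          have hd : pvDOf e y = inner := by simp [pvDOf, h1]
          simp only [pvSum, List.map_cons, List.sum_cons, hd]
          rw [pvCnt_eq_keysFilter l2 inner (hval y inner h1)]
          ring

-- ===== VERDICT (by name: the statement is the Claim_ definition above) =====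
theorem remove_connections_nodes_split_spec : Claim_equal_remove_connections_nodes_split := by
  intro l1 l2 ef _
  unfold Spec_remove_connections_nodes_split
  unfold remove_connections_nodes_split remove_connections_nodes_split_alt
  simp only [PySem.List.dedup_eq_ofList]
  rw [pv_outerA l2 l1 0 (pvDecode ef),
    pv_outerB l2 (pvDecode ef) (fun n inner h => pv_decode_keys_nodup ef n inner h)
      (PySem.Set.ofList l1) 0]
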